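-- pv_equiv track=rewrite | github.com/rajkrish0608/Definitely-Normal-Physics | scripts/utility/level_balance_analyzer.py | analyze_hazard_density
-- ===== SOURCE A (Python) =====
-- def analyze_hazard_density(data):
--     """Check for excessive hazard clustering."""
--     issues = []
--     hazards = data.get("hazards", [])
--
--     if len(hazards) < 3:
--         return issues
--
--     # Check for clusters (3+ hazards within 200px)
--     for i, h1 in enumerate(hazards):
--         nearby = 0
--         for j, h2 in enumerate(hazards):
--             if i != j:
--                 dist = abs(h1["position"][0] - h2["position"][0])
--                 if dist < 200:
--                     nearby += 1
--
--         if nearby >= 4: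
--             issues.append(
--                 f"⚠️  Hazard cluster ({nearby+1} hazards) near x={h1['position'][0]}"
--             )
--             break  # Only report once per level
--
--     return issues
-- ===== SOURCE B (Python) =====
-- def analyze_hazard_density(data):
--     """Check for excessive hazard clustering."""
--     hazards = data.get("hazards", [])
--     if len(hazards) < 3:
--         return []
--
--     xs = [h["position"][0] for h in hazards]
--     s = sorted(xs)
--     n = len(s)
--
--     def bisect_left(v):
--         lo, hi = 0, n
--         while lo < hi:
--             mid = (lo + hi) // 2
--             if s[mid] < v:
--                 lo = mid + 1
--             else:
--                 hi = mid
--         return lo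
--
--     def bisect_right(v):
--         lo, hi = 0, n
--         while lo < hi:
--             mid = (lo + hi) // 2
--             if s[mid] <= v:
--                 lo = mid + 1
--             else:
--                 hi = mid
--         return lo
--
--     for x in xs:
--         # hazards with |x - y| < 200, excluding this one
--         cnt = bisect_left(x + 200) - bisect_right(x - 200) - 1
--         if cnt >= 4:
--             return [f"⚠️  Hazard cluster ({cnt+1} hazards) near x={x}"]
--     return []
-- ===== Notes on version B (the rewrite author's own statement) =====
-- stated objective: alternative
-- what changed: Replaces the nested neighbor scan with sorting the x-coordinates once and counting each hazard's <200px neighbors by two hand-written binary searches (bisect_left/bisect_right) during a single scan in original order; not measurably faster on the benchmark inputs because A's early break usually fires quickly.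
import Mathlib
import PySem

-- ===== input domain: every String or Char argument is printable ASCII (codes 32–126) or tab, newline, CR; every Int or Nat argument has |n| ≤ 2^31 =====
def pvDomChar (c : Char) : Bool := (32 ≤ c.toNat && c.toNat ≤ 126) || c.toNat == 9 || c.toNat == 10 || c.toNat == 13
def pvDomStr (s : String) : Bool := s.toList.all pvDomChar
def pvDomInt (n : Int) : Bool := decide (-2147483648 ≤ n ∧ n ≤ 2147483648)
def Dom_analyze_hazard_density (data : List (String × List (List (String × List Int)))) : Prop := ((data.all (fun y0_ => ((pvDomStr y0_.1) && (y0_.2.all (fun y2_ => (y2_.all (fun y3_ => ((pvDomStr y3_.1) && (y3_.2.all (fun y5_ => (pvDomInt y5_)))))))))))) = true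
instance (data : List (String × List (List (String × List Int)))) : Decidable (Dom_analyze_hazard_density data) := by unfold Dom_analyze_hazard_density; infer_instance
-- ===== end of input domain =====

-- B replaces A's nested neighbor scan by sorting the x-coordinates once and counting each
-- hazard's <200px neighbors with two binary searches (objective: alternative algorithm).

-- helper shared by both ports: the Python expression h["position"][0] (both sources contain it verbatim);
-- total via defaults, exact on Pre_ (which excludes the raising inputs)
def pvHazX (h : List (String × List Int)) : Int :=
  (PySem.List.pyGet? ((PySem.Dict.get? (PySem.Dict.mk h) "position").getD []) 0).getD 0

-- the f-string both sources contain verbatim (c = the computed neighbor count)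
def pvMsg (c x : Int) : String :=
  "⚠️  Hazard cluster (" ++ PySem.Int.toStr (c + 1) ++ " hazards) near x=" ++ PySem.Int.toStr x

-- ===== PORT A =====
-- inner loop: nearby = count over enumerate(hazards) of j ≠ i with |x1 - x2| < 200
def pvNearby (hazards : List (List (String × List Int))) (i : Int) (x1 : Int) : Int :=
  (PySem.List.enumerate hazards).foldl
    (fun nearby jh =>
      if i ≠ jh.1 then
        (if |x1 - pvHazX jh.2| < 200 then nearby + 1 else nearby)
      else nearby) 0

-- outer loop with the break: first (i, h1) whose nearby ≥ 4 yields the single issue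
def pvScanA (hazards : List (List (String × List Int))) :
    List (Int × List (String × List Int)) → List String
  | [] => []
  | ih :: rest =>
    let nearby := pvNearby hazards ih.1 (pvHazX ih.2)
    if nearby ≥ 4 then [pvMsg nearby (pvHazX ih.2)] else pvScanA hazards rest

def analyze_hazard_density (data : List (String × List (List (String × List Int)))) : List String :=
  let hazards := (PySem.Dict.get? (PySem.Dict.mk data) "hazards").getD []
  if hazards.length < 3 then []
  else pvScanA hazards (PySem.List.enumerate hazards)

-- ===== PORT B =====
-- Source B's hand-written bisect_left/bisect_right are literally the loops of PySem.List.bisectLeft/bisectRight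
def pvCnt (s : List Int) (x : Int) : Int :=
  ((PySem.List.bisectLeft s (x + 200) : Int)) - ((PySem.List.bisectRight s (x - 200) : Int)) - 1

def pvScanB (s : List Int) : List Int → List String
  | [] => []
  | x :: rest =>
    let cnt := pvCnt s x
    if cnt ≥ 4 then [pvMsg cnt x] else pvScanB s rest

def analyze_hazard_density_alt (data : List (String × List (List (String × List Int)))) : List String :=
  let hazards := (PySem.Dict.get? (PySem.Dict.mk data) "hazards").getD []
  if hazards.length < 3 then []
  else
    let xs := hazards.map pvHazX
    let s := PySem.List.sorted xs (fun v => v) false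
    pvScanB s xs

-- ===== PRECONDITION & SPEC =====
-- Pre_ excludes exactly the inputs where Python A raises: with 3+ hazards, every hazard must carry a
-- non-empty "position" list (otherwise h["position"][0] raises KeyError/IndexError).
def Pre_analyze_hazard_density (data : List (String × List (List (String × List Int)))) : Prop :=
  (((PySem.Dict.get? (PySem.Dict.mk data) "hazards").getD []).length < 3) ∨
  (∀ h ∈ ((PySem.Dict.get? (PySem.Dict.mk data) "hazards").getD []),
     ((PySem.Dict.get? (PySem.Dict.mk h) "position").getD []) ≠ ([] : List Int))
instance (data : List (String × List (List (String × List Int)))) : Decidable (Pre_analyze_hazard_density data) := by unfold Pre_analyze_hazard_density; infer_instance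

def pvWitness_analyze_hazard_density : (List (String × List (List (String × List Int)))) :=
  [("hazards", [[("position", [0])], [("position", [50])], [("position", [500])]])]

def Spec_analyze_hazard_density (data : List (String × List (List (String × List Int)))) (out : List String) : Prop := out = analyze_hazard_density_alt data
instance (data : List (String × List (List (String × List Int)))) (out : List String) : Decidable (Spec_analyze_hazard_density data out) := by unfold Spec_analyze_hazard_density; infer_instance

-- ===== CLAIM (what is proved, stated in full; the proofs are below) =====
def Claim_equal_analyze_hazard_density : Prop := ∀ (data : List (String × List (List (String × List Int)))), Dom_analyze_hazard_density data → Pre_analyze_hazard_density data → Spec_analyze_hazard_density data (analyze_hazard_density data)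

-- ===== LEMMAS AND PROOFS =====

-- countP splits along any second predicate
theorem pv_countP_split {α : Type} (l : List α) (p q : α → Bool) :
    l.countP p = l.countP (fun a => p a && q a) + l.countP (fun a => p a && !q a) := by
  induction l with
  | nil => simp
  | cons a t ih =>
    simp only [List.countP_cons]
    cases hp : p a <;> cases hq : q a <;> simp [hp, hq] <;> omega

-- a count determined by a split point
theorem pv_countP_eq_of_bounds (s : List Int) (p : Int → Bool) (r : Nat) (hr : r ≤ s.length)
    (h1 : ∀ (j : Nat) (hj : j < s.length), j < r → p s[j] = true)
    (h2 : ∀ (j : Nat) (hj : j < s.length), r ≤ j → p s[j] = false) :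
    s.countP p = r := by
  conv_lhs => rw [← List.take_append_drop r s]
  rw [List.countP_append]
  have ht : (s.take r).countP p = r := by
    rw [List.countP_eq_length.mpr, List.length_take, Nat.min_eq_left hr]
    intro a ha
    obtain ⟨j, hj, rfl⟩ := List.mem_iff_getElem.mp ha
    have hjr : j < r := lt_of_lt_of_le hj (by simp [List.length_take])
    have hjs : j < s.length := lt_of_lt_of_le hjr hr
    have := List.getElem_take (xs := s) (i := j) (h := hj)
    rw [this]
    exact h1 j hjs hjr
  have hd : (s.drop r).countP p = 0 := by
    rw [List.countP_eq_zero]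
    intro a ha
    obtain ⟨j, hj, rfl⟩ := List.mem_iff_getElem.mp ha
    rw [List.getElem_drop]
    simp only [List.length_drop] at hj
    have := h2 (r + j) (by omega) (by omega)
    simp [this]
  omega

theorem pv_bisectLeft_eq_countP (s : List Int) (v : Int)
    (hs : s.Pairwise (fun a b => a ≤ b)) :
    PySem.List.bisectLeft s v = s.countP (fun y => decide (y < v)) := by
  obtain ⟨hle, hlt, hge⟩ := PySem.List.bisectLeft_spec s v hs
  exact (pv_countP_eq_of_bounds s _ _ hle
    (fun j hj hjr => by simpa using hlt j hj hjr)
    (fun j hj hjr => by simpa using not_lt.mpr (hge j hj hjr))).symm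

theorem pv_bisectRight_eq_countP (s : List Int) (v : Int)
    (hs : s.Pairwise (fun a b => a ≤ b)) :
    PySem.List.bisectRight s v = s.countP (fun y => decide (y ≤ v)) := by
  obtain ⟨hle, hlt, hge⟩ := PySem.List.bisectRight_spec s v hs
  exact (pv_countP_eq_of_bounds s _ _ hle
    (fun j hj hjr => by simpa using hlt j hj hjr)
    (fun j hj hjr => by simpa using not_le.mpr (hge j hj hjr))).symm

-- pvCnt counts the window |x - y| < 200 over the unsorted list, minus the element itself
theorem pv_cnt_eq (xs : List Int) (x : Int) :
    pvCnt (PySem.List.sorted xs (fun v => v) false) x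
      = (xs.countP (fun y => decide (|x - y| < 200)) : Int) - 1 := by
  set s := PySem.List.sorted xs (fun v => v) false with hsdef
  have hperm : s.Perm xs := PySem.List.sorted_perm xs (fun v => v) false
  have hpw : s.Pairwise (fun a b => a ≤ b) := PySem.List.sorted_pairwise xs (fun v => v)
  have hL := pv_bisectLeft_eq_countP s (x + 200) hpw
  have hR := pv_bisectRight_eq_countP s (x - 200) hpw
  have hsplit := pv_countP_split s (fun y => decide (y < x + 200)) (fun y => decide (y ≤ x - 200))
  have e1 : s.countP (fun y => decide (y < x + 200) && decide (y ≤ x - 200))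
      = s.countP (fun y => decide (y ≤ x - 200)) := by
    apply List.countP_congr
    intro y _
    constructor <;> intro h <;> simp_all <;> omega
  have e2 : s.countP (fun y => decide (y < x + 200) && !decide (y ≤ x - 200))
      = xs.countP (fun y => decide (|x - y| < 200)) := by
    rw [hperm.countP_eq]
    apply List.countP_congr
    intro y _
    constructor <;> intro h <;> simp_all [abs_lt] <;> omega
  unfold pvCnt
  rw [hL, hR]
  omega

-- exactly one entry of enumerate carries index s0+k, and it is l[k]
theorem pv_countP_enumerate_self {α : Type} (w : α → Bool) (l : List α) (s0 : Int) (k : Nat)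
    (hk : k < l.length) (hw : w l[k] = true) :
    (PySem.List.enumerate l s0).countP (fun p => decide (p.1 = s0 + (k : Int)) && w p.2) = 1 := by
  induction l generalizing s0 k with
  | nil => simp at hk
  | cons a t ih =>
    rw [PySem.List.enumerate_cons, List.countP_cons]
    cases k with
    | zero =>
      simp only [List.getElem_cons_zero] at hw
      have hz : (PySem.List.enumerate t (s0 + 1)).countP
          (fun p => decide (p.1 = s0 + ((0 : Nat) : Int)) && w p.2) = 0 := by
        rw [List.countP_eq_zero]
        intro p hp
        obtain ⟨j, hj, rfl⟩ := (PySem.List.mem_enumerate_iff t (s0 + 1) p).mp hp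
        simp only [Bool.and_eq_true, decide_eq_true_eq]
        rintro ⟨h1, -⟩
        omega
      rw [hz]
      simp [hw]
    | succ k' =>
      simp only [List.getElem_cons_succ] at hw
      have hk' : k' < t.length := by simpa using hk
      simp only [show s0 + ((k' + 1 : Nat) : Int) = (s0 + 1) + (k' : Int) from by push_cast; ring]
      rw [ih (s0 + 1) k' hk' hw]
      have hne : (decide (s0 = s0 + 1 + (k' : Int))) = false := by
        rw [decide_eq_false_iff_not]; omega
      simp [hne]

-- the inner loop of A equals pvCnt of the sorted list at the same x
theorem pv_nearby_eq (hazards : List (List (String × List Int))) (k : Nat)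
    (hk : k < hazards.length) :
    pvNearby hazards (k : Int) (pvHazX hazards[k])
      = pvCnt (PySem.List.sorted (hazards.map pvHazX) (fun v => v) false) (pvHazX hazards[k]) := by
  set x1 := pvHazX hazards[k] with hx1
  rw [pv_cnt_eq]
  -- rewrite the fold body as a single conditional count
  have hbody : (fun (nearby : Int) (jh : Int × List (String × List Int)) =>
      if (k : Int) ≠ jh.1 then
        (if |x1 - pvHazX jh.2| < 200 then nearby + 1 else nearby)
      else nearby)
      = (fun (nearby : Int) (jh : Int × List (String × List Int)) =>
          if ((k : Int) ≠ jh.1 ∧ |x1 - pvHazX jh.2| < 200) then nearby + 1 else nearby) := by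
    funext nearby jh
    by_cases h1 : (k : Int) ≠ jh.1 <;> by_cases h2 : |x1 - pvHazX jh.2| < 200 <;>
      simp [h1, h2]
  unfold pvNearby
  rw [hbody, PySem.List.foldl_ite_add_one]
  set E := PySem.List.enumerate hazards with hE
  set wB : List (String × List Int) → Bool := fun h => decide (|x1 - pvHazX h| < 200) with hwB
  have hclean : (fun (jh : Int × List (String × List Int)) =>
      decide ((k : Int) ≠ jh.1 ∧ |x1 - pvHazX jh.2| < 200))
      = (fun jh => wB jh.2 && !decide (jh.1 = (k : Int))) := by
    funext jh
    by_cases h1 : jh.1 = (k : Int) <;> by_cases h2 : |x1 - pvHazX jh.2| < 200 <;>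
      simp [h1, h2, hwB] <;> omega
  rw [hclean]
  have hsplit := pv_countP_split E (fun jh => wB jh.2) (fun jh => decide (jh.1 = (k : Int)))
  have htot : E.countP (fun jh => wB jh.2) = hazards.countP wB := by
    have := List.countP_map (p := wB) (f := fun p : Int × List (String × List Int) => p.2) (l := E)
    rw [PySem.List.map_snd_enumerate] at this
    rw [this]; rfl
  have hself : E.countP (fun jh => wB jh.2 && decide (jh.1 = (k : Int))) = 1 := by
    have hw : wB hazards[k] = true := by simp [hwB, ← hx1]
    have := pv_countP_enumerate_self wB hazards 0 k hk hw
    rw [hE]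
    rw [show (PySem.List.enumerate hazards : List (Int × List (String × List Int)))
        = PySem.List.enumerate hazards 0 from rfl]
    calc (PySem.List.enumerate hazards 0).countP (fun jh => wB jh.2 && decide (jh.1 = (k : Int)))
        = (PySem.List.enumerate hazards 0).countP
            (fun jh => decide (jh.1 = 0 + (k : Int)) && wB jh.2) := by
          apply List.countP_congr; intro p _; simp [Bool.and_comm]
      _ = 1 := this
  have hmapcount : hazards.countP wB
      = (hazards.map pvHazX).countP (fun y => decide (|x1 - y| < 200)) := by
    rw [List.countP_map]; rfl
  omega

-- the two scans agree element by element
theorem pv_scan_eq (hazards : List (List (String × List Int))) (s : List Int)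
    (L : List (Int × List (String × List Int)))
    (h : ∀ p ∈ L, pvNearby hazards p.1 (pvHazX p.2) = pvCnt s (pvHazX p.2)) :
    pvScanA hazards L = pvScanB s (L.map (fun p => pvHazX p.2)) := by
  induction L with
  | nil => rfl
  | cons p rest ih =>
    simp only [List.map_cons]
    rw [pvScanA, pvScanB]
    have hp := h p (List.mem_cons_self)
    simp only [hp]
    split
    · rfl
    · exact ih (fun q hq => h q (List.mem_cons_of_mem _ hq))

-- ===== VERDICT (by name: the statement is the Claim_ definition above) =====
theorem analyze_hazard_density_spec : Claim_equal_analyze_hazard_density := by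
  unfold Claim_equal_analyze_hazard_density
  intro data _ _
  unfold Spec_analyze_hazard_density analyze_hazard_density analyze_hazard_density_alt
  set hazards := (PySem.Dict.get? (PySem.Dict.mk data) "hazards").getD [] with hh
  by_cases hlen : hazards.length < 3
  · simp [hlen]
  · simp only [hlen, if_false]
    set s := PySem.List.sorted (hazards.map pvHazX) (fun v => v) false with hs
    have := pv_scan_eq hazards s (PySem.List.enumerate hazards) ?_
    · rw [this]
      congr 1
      have h2 : (PySem.List.enumerate hazards).map (fun p => pvHazX p.2)
          = ((PySem.List.enumerate hazards).map (fun p : Int × List (String × List Int) => p.2)).map pvHazX := by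
        rw [List.map_map]; rfl
      rw [h2, PySem.List.map_snd_enumerate]
    · intro p hp
      obtain ⟨k, hk, rfl⟩ := (PySem.List.mem_enumerate_iff hazards 0 p).mp hp
      simp only [zero_add]
      exact pv_nearby_eq hazards k hk
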